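-- pv_equiv track=rewrite | github.com/SoyGabrielRojas/OptiScan-Backend | main.py | obtener_rectangulo_rostro
-- ===== SOURCE A (Python) =====
-- def obtener_rectangulo_rostro(puntos_referencia):
--     """Obtener rectángulo del rostro basado en puntos clave"""
--     todos_puntos = list(puntos_referencia.values())
--     xs = [p[0] for p in todos_puntos]
--     ys = [p[1] for p in todos_puntos]
--
--     x = min(xs)
--     y = min(ys)
--     w = max(xs) - x
--     h = max(ys) - y
--
--     expand = 20
--     x = max(0, x - expand)
--     y = max(0, y - expand)
--     w = min(w + 2*expand, 1000)
--     h = min(h + 2*expand, 1000)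
--
--     return (int(x), int(y), int(w), int(h))  # <-- CONVERTIR A int
-- ===== SOURCE B (Python) =====
-- def obtener_rectangulo_rostro(puntos_referencia):
--     """Rectangulo del rostro: un solo recorrido manteniendo extremos corrientes."""
--     it = iter(puntos_referencia.values())
--     try:
--         x0, y0 = next(it)
--     except StopIteration:
--         raise ValueError("puntos_referencia vacio")
--     min_x = max_x = x0
--     min_y = max_y = y0
--     for px, py in it:
--         if px < min_x:
--             min_x = px
--         if px > max_x:
--             max_x = px
--         if py < min_y:
--             min_y = py
--         if py > max_y:
--             max_y = py
--     return (int(max(0, min_x - 20)), int(max(0, min_y - 20)),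
--             int(min(max_x - min_x + 40, 1000)), int(min(max_y - min_y + 40, 1000)))
-- ===== Notes on version B (the rewrite author's own statement) =====
-- stated objective: alternative
-- what changed: Single pass over the values maintaining running min_x/max_x/min_y/max_y instead of building xs/ys lists and calling min/max four times; the same int() casts and clamps are applied to the final extrema.
import Mathlib
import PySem

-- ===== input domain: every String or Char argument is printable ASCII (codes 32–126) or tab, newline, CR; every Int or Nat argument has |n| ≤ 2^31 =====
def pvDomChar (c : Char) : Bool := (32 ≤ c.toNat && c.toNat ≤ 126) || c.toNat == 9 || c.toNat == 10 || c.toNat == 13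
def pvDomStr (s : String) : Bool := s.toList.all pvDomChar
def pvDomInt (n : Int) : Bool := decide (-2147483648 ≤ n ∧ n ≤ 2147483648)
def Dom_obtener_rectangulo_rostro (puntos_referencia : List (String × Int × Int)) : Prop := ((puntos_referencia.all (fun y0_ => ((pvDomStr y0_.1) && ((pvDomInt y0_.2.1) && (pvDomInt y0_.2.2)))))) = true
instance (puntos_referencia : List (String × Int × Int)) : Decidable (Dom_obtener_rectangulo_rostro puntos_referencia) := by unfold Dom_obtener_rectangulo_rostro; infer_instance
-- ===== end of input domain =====

-- B replaces the xs/ys lists and four min/max passes by one loop with running extrema (alternative decomposition, not claimed faster).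

-- ===== PORT A =====
-- A: collect values, build xs and ys, take min/max of each, then clamp; int() is the identity on Int coordinates.
def obtener_rectangulo_rostro (puntos_referencia : List (String × Int × Int)) : Int × Int × Int × Int :=
  let todos_puntos := (PySem.Dict.ofList puntos_referencia).values
  let xs := todos_puntos.map (fun p => p.1)
  let ys := todos_puntos.map (fun p => p.2)
  match PySem.List.min? xs (fun v => v), PySem.List.min? ys (fun v => v),
        PySem.List.max? xs (fun v => v), PySem.List.max? ys (fun v => v) with
  | some x, some y, some mx, some my =>
      let w := mx - x
      let h := my - y
      let expand : Int := 20
      let x := max 0 (x - expand)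
      let y := max 0 (y - expand)
      let w := min (w + 2*expand) 1000
      let h := min (h + 2*expand) 1000
      (x, y, w, h)
  | _, _, _, _ => (0, 0, 0, 0)   -- Python raises ValueError here (empty dict); excluded by Pre_

-- ===== PORT B =====
-- one step of B's loop over the state (min_x, max_x, min_y, max_y)
def pvStepB (s : Int × Int × Int × Int) (p : Int × Int) : Int × Int × Int × Int :=
  let s := if p.1 < s.1 then (p.1, s.2.1, s.2.2.1, s.2.2.2) else s
  let s := if p.1 > s.2.1 then (s.1, p.1, s.2.2.1, s.2.2.2) else s
  let s := if p.2 < s.2.2.1 then (s.1, s.2.1, p.2, s.2.2.2) else s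
  if p.2 > s.2.2.2 then (s.1, s.2.1, s.2.2.1, p.2) else s

-- B: one pass keeping running extrema; the final int() casts are the identity on Int coordinates.
def obtener_rectangulo_rostro_alt (puntos_referencia : List (String × Int × Int)) : Int × Int × Int × Int :=
  match (PySem.Dict.ofList puntos_referencia).values with
  | [] => (0, 0, 0, 0)   -- Python raises ValueError here; excluded by Pre_
  | (x0, y0) :: rest =>
      let st := rest.foldl pvStepB (x0, x0, y0, y0)
      (max 0 (st.1 - 20), max 0 (st.2.2.1 - 20),
       min (st.2.1 - st.1 + 40) 1000, min (st.2.2.2 - st.2.2.1 + 40) 1000)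

-- ===== PRECONDITION & SPEC =====
-- Pre_ excludes only the empty dict, on which A raises ValueError (min() of an empty list) and B raises ValueError too.
def Pre_obtener_rectangulo_rostro (puntos_referencia : List (String × Int × Int)) : Prop :=
  puntos_referencia ≠ []
instance (puntos_referencia : List (String × Int × Int)) : Decidable (Pre_obtener_rectangulo_rostro puntos_referencia) := by unfold Pre_obtener_rectangulo_rostro; infer_instance

def pvWitness_obtener_rectangulo_rostro : (List (String × Int × Int)) := [("a", 3, 7), ("b", 100, -2)]

def Spec_obtener_rectangulo_rostro (puntos_referencia : List (String × Int × Int)) (out : Int × Int × Int × Int) : Prop := out = obtener_rectangulo_rostro_alt puntos_referencia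
instance (puntos_referencia : List (String × Int × Int)) (out : Int × Int × Int × Int) : Decidable (Spec_obtener_rectangulo_rostro puntos_referencia out) := by unfold Spec_obtener_rectangulo_rostro; infer_instance

-- ===== CLAIM (what is proved, stated in full; the proofs are below) =====
def Claim_equal_obtener_rectangulo_rostro : Prop := ∀ (puntos_referencia : List (String × Int × Int)), Dom_obtener_rectangulo_rostro puntos_referencia → Pre_obtener_rectangulo_rostro puntos_referencia → Spec_obtener_rectangulo_rostro puntos_referencia (obtener_rectangulo_rostro puntos_referencia)

-- ===== LEMMAS AND PROOFS =====

lemma pvStepB_eq (s : Int × Int × Int × Int) (p : Int × Int) :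
    pvStepB s p = (min s.1 p.1, max s.2.1 p.1, min s.2.2.1 p.2, max s.2.2.2 p.2) := by
  obtain ⟨a, b, c, d⟩ := s
  simp only [pvStepB]
  split_ifs <;> simp_all <;> omega

lemma pvFoldB_eq (rest : List (Int × Int)) (a b c d : Int) :
    rest.foldl pvStepB (a, b, c, d) =
      (rest.foldl (fun m p => min m p.1) a, rest.foldl (fun m p => max m p.1) b,
       rest.foldl (fun m p => min m p.2) c, rest.foldl (fun m p => max m p.2) d) := by
  induction rest generalizing a b c d with
  | nil => rfl
  | cons p t ih => simp [List.foldl_cons, pvStepB_eq, ih]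

lemma items_len_le_insert {κ ν : Type} [BEq κ] [LawfulBEq κ] (d : PySem.Dict κ ν) (k : κ) (v : ν) :
    d.items.length ≤ ((d.insert k v).items).length := by
  rw [PySem.Dict.items_insert]; split <;> simp

lemma items_len_le_update {κ ν : Type} [BEq κ] [LawfulBEq κ] (d : PySem.Dict κ ν) (ps : List (κ × ν)) :
    d.items.length ≤ ((d.update ps).items).length := by
  induction ps generalizing d with
  | nil => simp [PySem.Dict.update]
  | cons p t ih =>
      calc d.items.length ≤ ((d.insert p.1 p.2).items).length := items_len_le_insert d p.1 p.2
        _ ≤ (((d.insert p.1 p.2).update t).items).length := ih _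
        _ = ((d.update (p :: t)).items).length := by simp [PySem.Dict.update]

lemma values_ne_nil (l : List (String × Int × Int)) (h : l ≠ []) :
    (PySem.Dict.ofList l).values ≠ [] := by
  cases l with
  | nil => exact absurd rfl h
  | cons x t =>
      intro hv
      have hlen : ((PySem.Dict.ofList (x :: t)).items).length = 0 := by
        have := congrArg List.length hv
        simpa [PySem.Dict.values] using this
      have h1 : (1:Nat) ≤ ((PySem.Dict.ofList (x :: t)).items).length := by
        have : PySem.Dict.ofList (x :: t) = (PySem.Dict.empty.insert x.1 x.2).update t := by
          simp [PySem.Dict.ofList, PySem.Dict.update]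
        rw [this]
        have h2 : ((PySem.Dict.empty.insert x.1 x.2).items).length = 1 := by
          simp [PySem.Dict.items_insert, PySem.Dict.empty]
        calc (1:Nat) = ((PySem.Dict.empty.insert x.1 x.2).items).length := h2.symm
          _ ≤ _ := items_len_le_update _ t
      omega

theorem obtener_rectangulo_rostro_spec : Claim_equal_obtener_rectangulo_rostro := by
  intro l _hdom hpre
  unfold Spec_obtener_rectangulo_rostro
  unfold obtener_rectangulo_rostro obtener_rectangulo_rostro_alt
  have hv := values_ne_nil l hpre
  cases hvs : (PySem.Dict.ofList l).values with
  | nil => exact absurd hvs hv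
  | cons p rest =>
      obtain ⟨x0, y0⟩ := p
      simp only [List.map_cons, PySem.List.min?_id_cons, PySem.List.max?_id_cons,
        List.foldl_map, pvFoldB_eq]
      norm_num
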